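-- pv_equiv track=rewrite | github.com/VirologyCharite/2019-berlin-python-course | day-3/allNs.py | allNs_v1
-- ===== SOURCE A (Python) =====
-- def allNs_v1(string):
--     nCount = 0
--     for char in string:
--         if char == 'N':
--             nCount += 1
--
--     if nCount == len(string):
--         return True
--     else:
--         return False
-- ===== SOURCE B (Python) =====
-- def allNs_v1(string):
--     return string == 'N' * len(string)
-- ===== Notes on version B (the rewrite author's own statement) =====
-- stated objective: simpler
-- what changed: Replaces the explicit character loop with a counter by a single equality test against 'N' * len(string).
import Mathlib
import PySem

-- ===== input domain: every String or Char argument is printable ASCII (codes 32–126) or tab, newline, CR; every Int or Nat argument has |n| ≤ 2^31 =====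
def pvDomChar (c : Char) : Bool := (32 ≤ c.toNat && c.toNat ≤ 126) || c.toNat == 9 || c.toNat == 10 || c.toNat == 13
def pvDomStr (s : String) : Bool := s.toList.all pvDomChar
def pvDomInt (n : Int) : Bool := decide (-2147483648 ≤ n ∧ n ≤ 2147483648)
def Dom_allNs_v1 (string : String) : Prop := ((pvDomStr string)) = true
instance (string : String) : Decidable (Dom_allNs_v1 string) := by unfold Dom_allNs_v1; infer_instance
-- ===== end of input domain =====

-- B replaces A's counting loop by one equality test against 'N' * len(string); objective: simpler.

-- ===== PORT A =====
-- loop: nCount = 0; for char in string: if char == 'N': nCount += 1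
def allNs_v1 (string : String) : Bool :=
  let nCount := string.toList.foldl (fun acc char => if char = 'N' then acc + 1 else acc) (0 : Int)
  if nCount = PySem.Str.len string then true else false

-- ===== PORT B =====
-- 'N' * len(string) built as a character list, then one equality comparison
def allNs_v1_alt (string : String) : Bool :=
  string == String.ofList (List.replicate string.toList.length 'N')

-- ===== PRECONDITION & SPEC =====
def Spec_allNs_v1 (string : String) (out : Bool) : Prop := out = allNs_v1_alt string
instance (string : String) (out : Bool) : Decidable (Spec_allNs_v1 string out) := by unfold Spec_allNs_v1; infer_instance

-- ===== CLAIM (what is proved, stated in full; the proofs are below) =====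
def Claim_equal_allNs_v1 : Prop := ∀ (string : String), Dom_allNs_v1 string → Spec_allNs_v1 string (allNs_v1 string)

-- ===== LEMMAS AND PROOFS =====

-- counting matches over a list, with an arbitrary starting accumulator
lemma foldl_count_shift (l : List Char) (a : Int) :
    l.foldl (fun acc char => if char = 'N' then acc + 1 else acc) a
      = a + l.foldl (fun acc char => if char = 'N' then acc + 1 else acc) 0 := by
  induction l generalizing a with
  | nil => simp
  | cons c t ih =>
    simp only [List.foldl_cons]
    rw [ih, ih (if c = 'N' then 0 + 1 else 0)]
    split_ifs <;> ring

-- the count equals the length iff the list is all 'N's, i.e. equals replicate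
lemma count_eq_len_iff (l : List Char) :
    (l.foldl (fun acc char => if char = 'N' then acc + 1 else acc) 0 = (l.length : Int))
      ↔ l = List.replicate l.length 'N' := by
  induction l with
  | nil => simp
  | cons c t ih =>
    simp only [List.foldl_cons, List.length_cons, List.replicate_succ]
    rw [foldl_count_shift]
    constructor
    · intro h
      by_cases hc : c = 'N'
      · subst hc
        simp only [if_pos] at h
        have : t.foldl (fun acc char => if char = 'N' then acc + 1 else acc) 0 = (t.length : Int) := by
          push_cast at h ⊢; omega
        exact congrArg (List.cons 'N') (ih.mp this)
      · exfalso
        simp only [if_neg hc] at h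
        -- count of t is at most its length
        have hle : ∀ (m : List Char), m.foldl (fun acc char => if char = 'N' then acc + 1 else acc) 0 ≤ (m.length : Int) := by
          intro m
          induction m with
          | nil => simp
          | cons d u ihm =>
            simp only [List.foldl_cons, List.length_cons]
            rw [foldl_count_shift]
            split_ifs <;> push_cast <;> omega
        have := hle t
        push_cast at h
        omega
    · intro h
      obtain ⟨hc, ht⟩ := List.cons_eq_cons.mp h
      subst hc
      have : t.foldl (fun acc char => if char = 'N' then acc + 1 else acc) 0 = (t.length : Int) := by
        rw [ih]; exact ht
      simp [this]
      omega

-- ===== VERDICT (by name: the statement is the Claim_ definition above) =====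
theorem allNs_v1_spec : Claim_equal_allNs_v1 := by
  intro s _
  unfold Spec_allNs_v1 allNs_v1 allNs_v1_alt
  simp only [PySem.Str.len]
  rw [Bool.eq_iff_iff, beq_iff_eq]
  constructor
  · intro h
    split_ifs at h with hc
    · have hl := (count_eq_len_iff s.toList).mp hc
      conv_lhs => rw [← String.ofList_toList (s := s)]
      exact congrArg String.ofList hl
  · intro h
    have hl : s.toList = List.replicate s.toList.length 'N' := by
      have := congrArg String.toList h
      simpa using this
    rw [if_pos ((count_eq_len_iff s.toList).mpr hl)]
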